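-- pv_equiv track=rewrite | github.com/osunama/clases_phyton_big_data | 3_estructura_datos/3_listas/filtrar_listas.py | obtener_listas
-- ===== SOURCE A (Python) =====
-- def obtener_listas(lista, tipo):
--     pares = []
--     impares = []
--     for numero in lista:
--         if numero % 2 == 0:
--             pares.append(numero)
--         else:
--             impares.append(numero)
--     return pares if tipo == 'pares' else impares
-- ===== SOURCE B (Python) =====
-- def obtener_listas(lista, tipo):
--     # Stable sort by parity key: all evens (key 0) first, then all odds (key 1),
--     # each group keeping its original relative order; then slice the wanted group.
--     ordenada = sorted(lista, key=lambda n: n % 2)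
--     k = sum(1 for n in lista if n % 2 == 0)
--     return ordenada[:k] if tipo == 'pares' else ordenada[k:]
-- ===== Notes on version B (the rewrite author's own statement) =====
-- stated objective: alternative
-- what changed: B stably sorts the list by the parity key n%2 (evens before odds, original order kept within each group), counts the evens, and returns the corresponding slice, instead of A's two-accumulator partition loop with a final select.
import Mathlib
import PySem

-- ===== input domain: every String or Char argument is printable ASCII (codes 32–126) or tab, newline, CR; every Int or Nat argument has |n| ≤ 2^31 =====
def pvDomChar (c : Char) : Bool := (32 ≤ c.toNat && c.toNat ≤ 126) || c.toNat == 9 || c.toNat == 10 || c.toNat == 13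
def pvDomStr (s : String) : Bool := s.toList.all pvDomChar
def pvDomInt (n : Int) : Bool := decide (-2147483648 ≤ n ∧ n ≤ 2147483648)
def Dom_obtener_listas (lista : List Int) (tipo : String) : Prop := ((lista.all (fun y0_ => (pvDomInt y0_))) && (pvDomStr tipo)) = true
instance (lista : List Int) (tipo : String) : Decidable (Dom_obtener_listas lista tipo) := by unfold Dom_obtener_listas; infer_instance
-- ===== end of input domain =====

-- B replaces A's two-accumulator partition-then-select with a stable sort by the parity key
-- n % 2 followed by counting the evens and slicing out the requested group (objective: alternative).


-- ===== PORT A =====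
-- Transliteration of A: partition into (pares, impares) with a fold over the list, then select.
def obtener_listas (lista : List Int) (tipo : String) : List Int :=
  let st := lista.foldl (fun (acc : List Int × List Int) numero =>
    if PySem.Int.mod numero 2 = 0 then (acc.1 ++ [numero], acc.2)
    else (acc.1, acc.2 ++ [numero])) ([], [])
  if tipo = "pares" then st.1 else st.2

-- ===== PORT B =====
-- Transliteration of B: stable sort by parity key, count the evens, return the slice.
def obtener_listas_alt (lista : List Int) (tipo : String) : List Int :=
  let ordenada := PySem.List.sorted lista (fun n => PySem.Int.mod n 2)
  let k : Int := ((lista.filter (fun n => PySem.Int.mod n 2 = 0)).length : Int)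
  if tipo = "pares" then PySem.List.slice ordenada none (some k)
  else PySem.List.slice ordenada (some k) none

-- ===== PRECONDITION & SPEC =====
def Spec_obtener_listas (lista : List Int) (tipo : String) (out : List Int) : Prop := out = obtener_listas_alt lista tipo
instance (lista : List Int) (tipo : String) (out : List Int) : Decidable (Spec_obtener_listas lista tipo out) := by unfold Spec_obtener_listas; infer_instance

-- ===== CLAIM (what is proved, stated in full; the proofs are below) =====
def Claim_equal_obtener_listas : Prop := ∀ (lista : List Int) (tipo : String), Dom_obtener_listas lista tipo → Spec_obtener_listas lista tipo (obtener_listas lista tipo)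

-- ===== LEMMAS AND PROOFS =====

-- Every integer's Python-mod by 2 is 0 or 1.
lemma mod2_cases (x : Int) : PySem.Int.mod x 2 = 0 ∨ PySem.Int.mod x 2 = 1 := by
  have := Int.emod_two_eq_zero_or_one x
  simpa [PySem.Int.mod, Int.fmod_eq_emod] using this

-- insertBy unfolding equations.
lemma insertBy_nil {a : Type} (before : a -> a -> Bool) (x : a) :
    PySem.List.insertBy before x [] = [x] := rfl

lemma insertBy_cons {a : Type} (before : a -> a -> Bool) (x y : a) (ys : List a) :
    PySem.List.insertBy before x (y :: ys)
      = if before x y then x :: y :: ys else y :: PySem.List.insertBy before x ys := rfl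

-- Inserting an even element into evens ++ odds puts it right between the groups.
lemma insertBy_even (x : Int) (hx : PySem.Int.mod x 2 = 0) :
    ∀ (E O : List Int), (∀ e ∈ E, PySem.Int.mod e 2 = 0) → (∀ o ∈ O, PySem.Int.mod o 2 = 1) →
    PySem.List.insertBy (fun a b => decide (PySem.Int.mod a 2 < PySem.Int.mod b 2)) x (E ++ O)
      = E ++ x :: O := by
  intro E
  induction E with
  | nil =>
    intro O _ hO
    cases O with
    | nil => simp only [List.nil_append, insertBy_nil]
    | cons o os =>
      have ho : PySem.Int.mod o 2 = 1 := hO o (by simp)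
      have hc : decide (PySem.Int.mod x 2 < PySem.Int.mod o 2) = true := by
        rw [hx, ho]; decide
      rw [List.nil_append, insertBy_cons, hc, if_pos rfl, List.nil_append]
  | cons e es ih =>
    intro O hE hO
    have he : PySem.Int.mod e 2 = 0 := hE e (by simp)
    have hc : decide (PySem.Int.mod x 2 < PySem.Int.mod e 2) = false := by
      rw [hx, he]; decide
    rw [List.cons_append, insertBy_cons, hc]
    rw [if_neg (by simp), ih O (fun a ha => hE a (by simp [ha])) hO, List.cons_append]

-- Inserting an odd element appends it at the end.
lemma insertBy_odd (x : Int) (hx : PySem.Int.mod x 2 = 1) (acc : List Int) :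
    PySem.List.insertBy (fun a b => decide (PySem.Int.mod a 2 < PySem.Int.mod b 2)) x acc
      = acc ++ [x] := by
  apply PySem.List.insertBy_of_forall_not_before
  intro y _
  rcases mod2_cases y with h | h <;> rw [hx, h] <;> decide

-- The insertion-sort fold keeps the accumulator in evens ++ odds form.
lemma fold_sort (xs : List Int) : ∀ (E O : List Int),
    (∀ e ∈ E, PySem.Int.mod e 2 = 0) → (∀ o ∈ O, PySem.Int.mod o 2 = 1) →
    xs.foldl (fun acc x =>
      PySem.List.insertBy (fun a b => decide (PySem.Int.mod a 2 < PySem.Int.mod b 2)) x acc)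
      (E ++ O)
    = (E ++ xs.filter (fun n => PySem.Int.mod n 2 = 0))
      ++ (O ++ xs.filter (fun n => PySem.Int.mod n 2 = 1)) := by
  induction xs with
  | nil => intro E O _ _; simp only [List.foldl_nil, List.filter_nil, List.append_nil]
  | cons x t ih =>
    intro E O hE hO
    have e0 := mod2_cases x
    rcases e0 with hx | hx
    · have f0 : decide (PySem.Int.mod x 2 = 0) = true := by rw [hx]; decide
      have f1 : decide (PySem.Int.mod x 2 = 1) = false := by rw [hx]; decide
      rw [List.foldl_cons, insertBy_even x hx E O hE hO]
      have hstep := ih (E ++ [x]) O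
        (by intro e he; rcases List.mem_append.mp he with h | h
            · exact hE e h
            · simp at h; subst h; exact hx) hO
      rw [List.append_assoc, List.singleton_append] at hstep
      rw [hstep, List.filter_cons, List.filter_cons, f0, f1]
      simp only [if_true, Bool.false_eq_true, if_false, List.append_assoc, List.cons_append,
        List.nil_append]
    · have f0 : decide (PySem.Int.mod x 2 = 0) = false := by rw [hx]; decide
      have f1 : decide (PySem.Int.mod x 2 = 1) = true := by rw [hx]; decide
      rw [List.foldl_cons, insertBy_odd x hx (E ++ O), List.append_assoc]
      have hstep := ih E (O ++ [x]) hE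
        (by intro o ho; rcases List.mem_append.mp ho with h | h
            · exact hO o h
            · simp at h; subst h; exact hx)
      rw [hstep, List.filter_cons, List.filter_cons, f0, f1]
      simp only [if_true, Bool.false_eq_true, if_false, List.append_assoc, List.cons_append,
        List.nil_append]

-- sorted by parity is: evens (in order) then odds (in order).
lemma sorted_parity (xs : List Int) :
    PySem.List.sorted xs (fun n => PySem.Int.mod n 2)
      = xs.filter (fun n => PySem.Int.mod n 2 = 0)
        ++ xs.filter (fun n => PySem.Int.mod n 2 = 1) := by
  rw [PySem.List.sorted_eq_foldl_insertBy]
  have := fold_sort xs [] [] (by simp) (by simp)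
  simpa using this

-- A's partition fold, characterised by two filters.
lemma obtener_fold (lista : List Int) (p i : List Int) :
    lista.foldl (fun (acc : List Int × List Int) numero =>
      if PySem.Int.mod numero 2 = 0 then (acc.1 ++ [numero], acc.2)
      else (acc.1, acc.2 ++ [numero])) (p, i)
    = (p ++ lista.filter (fun n => PySem.Int.mod n 2 = 0),
       i ++ lista.filter (fun n => PySem.Int.mod n 2 = 1)) := by
  induction lista generalizing p i with
  | nil => simp only [List.foldl_nil, List.filter_nil, List.append_nil]
  | cons x xs ih =>
    rcases mod2_cases x with h | h
    · have f0 : decide (PySem.Int.mod x 2 = 0) = true := by rw [h]; decide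
      have f1 : decide (PySem.Int.mod x 2 = 1) = false := by rw [h]; decide
      rw [List.foldl_cons, if_pos h, ih, List.filter_cons, List.filter_cons, f0, f1]
      simp only [if_true, Bool.false_eq_true, if_false, List.append_assoc, List.singleton_append]
    · have h' : ¬ (PySem.Int.mod x 2 = 0) := by rw [h]; decide
      have f0 : decide (PySem.Int.mod x 2 = 0) = false := by rw [h]; decide
      have f1 : decide (PySem.Int.mod x 2 = 1) = true := by rw [h]; decide
      rw [List.foldl_cons, if_neg h', ih, List.filter_cons, List.filter_cons, f0, f1]
      simp only [if_true, Bool.false_eq_true, if_false, List.append_assoc, List.singleton_append]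

-- ===== VERDICT (by name: the statement is the Claim_ definition above) =====
theorem obtener_listas_spec : Claim_equal_obtener_listas := by
  intro lista tipo _
  unfold Spec_obtener_listas obtener_listas obtener_listas_alt
  simp only [obtener_fold, sorted_parity, List.nil_append]
  split_ifs with h
  · rw [PySem.List.slice_to_natCast]
    exact List.take_left.symm
  · rw [PySem.List.slice_from_natCast]
    exact List.drop_left.symm
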